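-- pv_equiv track=rewrite | github.com/Prafulla-Bharate/backend | services/ml/job_matcher.py | _fuzzy_skill_match
-- ===== SOURCE A (Python) =====
-- def _fuzzy_skill_match(skill: str, skill_set: set) -> bool:
--     """Check for fuzzy skill matching."""
--     skill = skill.lower()
--
--     for s in skill_set:
--         # Substring match
--         if skill in s or s in skill:
--             return True
--
--         # Partial word match
--         skill_words = set(skill.split())
--         s_words = set(s.split())
--         if skill_words & s_words:
--             return True
--
--     return False
-- ===== SOURCE B (Python) =====
-- def _fuzzy_skill_match(skill: str, skill_set: set) -> bool:
--     """Check for fuzzy skill matching (word-index variant)."""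
--     skill = skill.lower()
--     skill_words = set(skill.split())
--     all_words = set()
--     for s in skill_set:
--         if skill in s or s in skill:
--             return True
--         all_words.update(s.split())
--     return bool(skill_words & all_words)
-- ===== Notes on version B (the rewrite author's own statement) =====
-- stated objective: alternative
-- what changed: B computes skill's word set once before the loop and, instead of intersecting per element, accumulates one aggregate word set over all elements and does a single intersection after the loop (the substring early-return stays per element).
import Mathlib
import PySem

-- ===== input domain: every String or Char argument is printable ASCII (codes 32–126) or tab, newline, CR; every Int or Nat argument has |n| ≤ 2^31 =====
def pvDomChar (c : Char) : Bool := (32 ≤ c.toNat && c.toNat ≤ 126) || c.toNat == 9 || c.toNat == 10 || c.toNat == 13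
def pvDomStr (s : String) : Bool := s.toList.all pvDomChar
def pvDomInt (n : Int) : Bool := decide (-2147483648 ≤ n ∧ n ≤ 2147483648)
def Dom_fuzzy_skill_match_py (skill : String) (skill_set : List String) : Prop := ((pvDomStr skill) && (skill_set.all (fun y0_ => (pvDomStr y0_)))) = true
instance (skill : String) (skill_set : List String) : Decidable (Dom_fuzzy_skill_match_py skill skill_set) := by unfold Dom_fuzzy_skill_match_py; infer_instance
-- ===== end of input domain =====

-- B computes the skill word set once and does one aggregate word-set intersection after the
-- substring loop, instead of a per-element split and intersection (alternative decomposition).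

-- ===== PORT A =====
def fuzzy_skill_match_py_loop (skill : String) : List String → Bool
  | [] => false
  | s :: rest =>
    if PySem.Str.isIn skill s || PySem.Str.isIn s skill then true
    else
      let skill_words : PySem.Set String := PySem.Set.ofList (PySem.Str.split₀ skill)
      let s_words : PySem.Set String := PySem.Set.ofList (PySem.Str.split₀ s)
      if PySem.Set.inter skill_words s_words ≠ [] then true
      else fuzzy_skill_match_py_loop skill rest

def fuzzy_skill_match_py (skill : String) (skill_set : List String) : Bool :=
  let skill := PySem.Str.lower skill
  fuzzy_skill_match_py_loop skill skill_set


-- ===== PORT B =====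
def fuzzy_skill_match_py_alt_loop (skill : String) (skill_words : PySem.Set String) :
    List String → PySem.Set String → Bool
  | [], all_words => PySem.Set.inter skill_words all_words ≠ []
  | s :: rest, all_words =>
    if PySem.Str.isIn skill s || PySem.Str.isIn s skill then true
    else fuzzy_skill_match_py_alt_loop skill skill_words rest
      (PySem.Set.update all_words (PySem.Str.split₀ s))

def fuzzy_skill_match_py_alt (skill : String) (skill_set : List String) : Bool :=
  let skill := PySem.Str.lower skill
  let skill_words : PySem.Set String := PySem.Set.ofList (PySem.Str.split₀ skill)
  fuzzy_skill_match_py_alt_loop skill skill_words skill_set PySem.Set.empty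


-- ===== PRECONDITION & SPEC =====
def Spec_fuzzy_skill_match_py (skill : String) (skill_set : List String) (out : Bool) : Prop := out = fuzzy_skill_match_py_alt skill skill_set
instance (skill : String) (skill_set : List String) (out : Bool) : Decidable (Spec_fuzzy_skill_match_py skill skill_set out) := by unfold Spec_fuzzy_skill_match_py; infer_instance

-- ===== CLAIM (what is proved, stated in full; the proofs are below) =====
def Claim_equal_fuzzy_skill_match_py : Prop := ∀ (skill : String) (skill_set : List String), Dom_fuzzy_skill_match_py skill skill_set → Spec_fuzzy_skill_match_py skill skill_set (fuzzy_skill_match_py skill skill_set)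

-- ===== LEMMAS AND PROOFS =====

-- ===== VERDICT (by name: the statement is the Claim_ definition above) =====
-- nonempty intersection of Sets, as an existential
lemma inter_ne_nil_iff (s t : PySem.Set String) :
    PySem.Set.inter s t ≠ [] ↔ ∃ x ∈ s, x ∈ t := by
  rw [ne_eq, List.eq_nil_iff_forall_not_mem]
  push Not
  simp [PySem.Set.mem_inter]

lemma loopA_iff (sk : String) (l : List String) :
    fuzzy_skill_match_py_loop sk l = true ↔
      ∃ s ∈ l, (PySem.Str.isIn sk s || PySem.Str.isIn s sk) = true ∨
        ∃ w ∈ PySem.Str.split₀ sk, w ∈ PySem.Str.split₀ s := by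
  induction l with
  | nil => simp [fuzzy_skill_match_py_loop]
  | cons s rest ih =>
    simp only [fuzzy_skill_match_py_loop]
    by_cases h : (PySem.Str.isIn sk s || PySem.Str.isIn s sk) = true
    · rw [if_pos h]
      simp only [List.mem_cons, true_iff]
      exact ⟨s, Or.inl rfl, Or.inl h⟩
    · rw [if_neg h]
      by_cases h2 : PySem.Set.inter (PySem.Set.ofList (PySem.Str.split₀ sk))
          (PySem.Set.ofList (PySem.Str.split₀ s)) ≠ []
      · rw [if_pos h2, inter_ne_nil_iff] at *
        simp only [PySem.Set.mem_ofList] at h2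
        simp only [List.mem_cons, true_iff]
        exact ⟨s, Or.inl rfl, Or.inr h2⟩
      · rw [if_neg h2, ih]
        rw [inter_ne_nil_iff] at h2
        simp only [PySem.Set.mem_ofList] at h2
        constructor
        · rintro ⟨x, hx, hm⟩; exact ⟨x, List.mem_cons_of_mem _ hx, hm⟩
        · rintro ⟨x, hx, hm⟩
          rcases List.mem_cons.mp hx with rfl | hx'
          · rcases hm with hm | hm
            · exact absurd hm h
            · exact absurd hm h2
          · exact ⟨x, hx', hm⟩

lemma loopB_iff (sk : String) (l : List String) (all : PySem.Set String) :
    fuzzy_skill_match_py_alt_loop sk (PySem.Set.ofList (PySem.Str.split₀ sk)) l all = true ↔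
      (∃ w ∈ PySem.Str.split₀ sk, w ∈ all) ∨
      ∃ s ∈ l, (PySem.Str.isIn sk s || PySem.Str.isIn s sk) = true ∨
        ∃ w ∈ PySem.Str.split₀ sk, w ∈ PySem.Str.split₀ s := by
  induction l generalizing all with
  | nil =>
    simp only [fuzzy_skill_match_py_alt_loop, List.not_mem_nil, decide_eq_true_eq]
    rw [inter_ne_nil_iff]
    simp [PySem.Set.mem_ofList]
  | cons s rest ih =>
    simp only [fuzzy_skill_match_py_alt_loop]
    by_cases h : (PySem.Str.isIn sk s || PySem.Str.isIn s sk) = true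
    · rw [if_pos h]
      simp only [List.mem_cons, true_iff]
      exact Or.inr ⟨s, Or.inl rfl, Or.inl h⟩
    · rw [if_neg h, ih]
      simp only [PySem.Set.mem_update, List.mem_cons]
      constructor
      · rintro (⟨w, hw, hall | hs⟩ | ⟨x, hx, hm⟩)
        · exact Or.inl ⟨w, hw, hall⟩
        · exact Or.inr ⟨s, Or.inl rfl, Or.inr ⟨w, hw, hs⟩⟩
        · exact Or.inr ⟨x, Or.inr hx, hm⟩
      · rintro (⟨w, hw, hall⟩ | ⟨x, hx, hm⟩)
        · exact Or.inl ⟨w, hw, Or.inl hall⟩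
        · rcases hx with rfl | hx'
          · rcases hm with hm | ⟨w, hw, hs⟩
            · exact absurd hm h
            · exact Or.inl ⟨w, hw, Or.inr hs⟩
          · exact Or.inr ⟨x, hx', hm⟩

-- ===== VERDICT =====
theorem fuzzy_skill_match_py_spec : Claim_equal_fuzzy_skill_match_py := by
  intro skill skill_set _
  unfold Spec_fuzzy_skill_match_py fuzzy_skill_match_py fuzzy_skill_match_py_alt
  simp only []
  rw [Bool.eq_iff_iff, loopA_iff, loopB_iff]
  simp [PySem.Set.empty]
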